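-- pv_equiv track=rewrite | github.com/1ce2k/iti0102-2023 | EX/ex04_validation/email_validation.py | is_valid_username
-- ===== SOURCE A (Python) =====
-- def is_valid_username(email: str) -> bool:
--     """
--     Return True if username is valid.
--
--     Username cannot contain any special symbols except '.'.
--     """
--     allowed_chars = set('abcdefghijklmnopqrstuvwxyz0123456789.')
--     username = email.split('@')
--     if len(username) != 2:
--         return False
--     for i in username[0]:
--         if i.lower() not in allowed_chars:
--             return False
--     return True
-- ===== SOURCE B (Python) =====
-- import re
--
-- _USERNAME_RE = re.compile(r'[a-zA-Z0-9.]*')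
--
-- def is_valid_username(email: str) -> bool:
--     """Return True if the part before a single '@' matches [a-zA-Z0-9.]*."""
--     parts = email.split('@')
--     if len(parts) != 2:
--         return False
--     return _USERNAME_RE.fullmatch(parts[0]) is not None
-- ===== Notes on version B (the rewrite author's own statement) =====
-- stated objective: idiomatic
-- what changed: Replaces A's hand-built allowed-character set, per-character lower() normalisation and explicit early-return loop by a single compiled regular-expression fullmatch against the character class [a-zA-Z0-9.]* (both cases listed explicitly, '*' so an empty username is valid), keeping only the split-on-'@' two-parts guard.
import Mathlib
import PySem

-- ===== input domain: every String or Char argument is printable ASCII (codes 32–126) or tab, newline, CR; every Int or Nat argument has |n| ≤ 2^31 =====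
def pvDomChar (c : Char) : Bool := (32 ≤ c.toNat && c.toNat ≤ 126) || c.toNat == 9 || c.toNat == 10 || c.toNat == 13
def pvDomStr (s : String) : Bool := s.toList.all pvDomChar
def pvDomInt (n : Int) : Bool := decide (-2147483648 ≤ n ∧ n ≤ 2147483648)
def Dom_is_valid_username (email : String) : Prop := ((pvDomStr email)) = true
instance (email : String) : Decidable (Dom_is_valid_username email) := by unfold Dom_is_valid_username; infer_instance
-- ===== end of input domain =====

set_option maxRecDepth 8000

-- B replaces A's allowed-set + per-char lower() + explicit early-return loop by a regex
-- fullmatch against [a-zA-Z0-9.]* after the same split-on-'@' guard (objective: idiomatic).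

-- ===== PORT A =====
-- Port of A: set of allowed lowercase chars, split on '@', explicit per-char loop lowering each char.
def pvAllowedA : PySem.Set Char := PySem.Set.ofList ['a', 'b', 'c', 'd', 'e', 'f', 'g', 'h', 'i', 'j', 'k', 'l', 'm', 'n', 'o', 'p', 'q', 'r', 's', 't', 'u', 'v', 'w', 'x', 'y', 'z', '0', '1', '2', '3', '4', '5', '6', '7', '8', '9', '.']

-- the for-loop with early return over the username's characters
def pvCheckA : List Char → Bool
  | [] => true
  | c :: rest =>
      if PySem.Set.contains pvAllowedA (PySem.Chars.lowerChar c) = false then false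
      else pvCheckA rest

def is_valid_username (email : String) : Bool :=
  let username := (PySem.Str.split? email "@").getD []   -- sep "@" ≠ "", so split? is some
  if username.length ≠ 2 then false
  else pvCheckA ((PySem.List.pyGet? username 0).getD "").toList  -- index 0 in range: length = 2

-- ===== PORT B =====
-- Hand-port of re.fullmatch(r'[a-zA-Z0-9.]*', s): the pattern is a single character class
-- under '*', so fullmatch succeeds iff every character of s is in the class — exact on all
-- inputs (no re.IGNORECASE, class membership is by code point).
def pvClassB (c : Char) : Bool :=
  ('a' ≤ c && c ≤ 'z') || ('A' ≤ c && c ≤ 'Z') || ('0' ≤ c && c ≤ '9') || c == '.'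

def pvFullmatchClassStarB (s : String) : Bool := s.toList.all pvClassB

def is_valid_username_alt (email : String) : Bool :=
  let parts := (PySem.Str.split? email "@").getD []
  if parts.length ≠ 2 then false
  else pvFullmatchClassStarB ((PySem.List.pyGet? parts 0).getD "")

-- ===== PRECONDITION & SPEC =====
def Spec_is_valid_username (email : String) (out : Bool) : Prop := out = is_valid_username_alt email
instance (email : String) (out : Bool) : Decidable (Spec_is_valid_username email out) := by unfold Spec_is_valid_username; infer_instance

-- ===== CLAIM (what is proved, stated in full; the proofs are below) =====
def Claim_equal_is_valid_username : Prop := ∀ (email : String), Dom_is_valid_username email → Spec_is_valid_username email (is_valid_username email)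

-- ===== LEMMAS AND PROOFS =====

-- per-character agreement, for characters below code 128, by computation
theorem pvChar_small : ∀ n : Nat, n < 128 →
    PySem.Set.contains pvAllowedA (PySem.Chars.lowerChar (Char.ofNat n))
      = pvClassB (Char.ofNat n) := by decide

-- per-character agreement for every character (≥ 128: both sides are false)
theorem pvChar_eq (c : Char) :
    PySem.Set.contains pvAllowedA (PySem.Chars.lowerChar c) = pvClassB c := by
  by_cases h : c.toNat < 128
  · have := pvChar_small c.toNat h
    rwa [Char.ofNat_toNat] at this
  · have h128 : 128 ≤ c.toNat := Nat.le_of_not_lt h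
    have hgt : ∀ d : Char, d.toNat < 128 → ¬ c ≤ d := by
      intro d hd hle
      have : c.toNat ≤ d.toNat := Char.le_def.mp hle
      omega
    have hup : PySem.Chars.isupper c = false := by
      simp only [PySem.Chars.isupper, Bool.and_eq_false_iff, decide_eq_false_iff_not]
      right; exact hgt 'Z' (by decide)
    have hlowc : PySem.Chars.lowerChar c = c := by
      simp [PySem.Chars.lowerChar, hup]
    have hcon : PySem.Set.contains pvAllowedA c = false := by
      have hsmall' : pvAllowedA.all (fun x => decide (x.toNat < 128)) = true := by decide
      have hsmall : ∀ x ∈ pvAllowedA, x.toNat < 128 := by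
        simpa [List.all_eq_true] using hsmall'
      have hnm : c ∉ pvAllowedA := fun hm => absurd (hsmall c hm) (by omega)
      simpa [PySem.Set.contains] using hnm
    have hcls : pvClassB c = false := by
      simp only [pvClassB, Bool.or_eq_false_iff, Bool.and_eq_false_iff,
        decide_eq_false_iff_not]
      refine ⟨⟨⟨Or.inr (hgt 'z' (by decide)), Or.inr (hgt 'Z' (by decide))⟩,
        Or.inr (hgt '9' (by decide))⟩, ?_⟩
      apply beq_eq_false_iff_ne.mpr
      intro hc; subst hc; exact absurd h128 (by decide)
    rw [hlowc, hcon, hcls]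

-- the explicit loop of A equals B's all-characters-in-class check
theorem pvCheckA_eq_all (l : List Char) :
    pvCheckA l = l.all pvClassB := by
  induction l with
  | nil => rfl
  | cons c rest ih =>
      simp only [pvCheckA, List.all_cons, pvChar_eq c, ih]
      cases pvClassB c <;> simp

-- ===== VERDICT (by name: the statement is the Claim_ definition above) =====
theorem is_valid_username_spec : Claim_equal_is_valid_username := by
  intro email _
  unfold Spec_is_valid_username is_valid_username is_valid_username_alt pvFullmatchClassStarB
  set parts := (PySem.Str.split? email "@").getD [] with hp
  by_cases h2 : parts.length = 2
  · simp [h2, pvCheckA_eq_all]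
  · simp [h2]
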